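-- pv_equiv track=rewrite | github.com/CederGroupHub/text-mined-solution-synthesis_public | OperationsExtraction/operations_extractor/utils.py | is_formula_like
-- ===== SOURCE A (Python) =====
-- elements_1 = ['H', 'B', 'C', 'N', 'O', 'F', 'P', 'S', 'K', 'V', 'Y', 'I', 'W', 'U']
--
-- elements_2 = ['He', 'Li', 'Be', 'Ne', 'Na', 'Mg', 'Al', 'Si', 'Cl', 'Ar', 'Ca', 'Sc', 'Ti', 'Cr',
--               'Mn', 'Fe', 'Co', 'Ni', 'Cu', 'Zn', 'Ga', 'Ge', 'As', 'Se', 'Br', 'Kr', 'Rb', 'Sr',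
--               'Zr', 'Nb', 'Mo', 'Tc', 'Ru', 'Rh', 'Pd', 'Ag', 'Cd', 'In', 'Sn', 'Sb', 'Te', 'Xe',
--               'Cs', 'Ba', 'La', 'Ce', 'Pr', 'Nd', 'Pm', 'Sm', 'Eu', 'Gd', 'Tb', 'Dy', 'Ho', 'Er',
--               'Tm', 'Yb', 'Lu', 'Hf', 'Ta', 'Re', 'Os', 'Ir', 'Pt', 'Au', 'Hg', 'Tl', 'Pb', 'Bi',
--               'Po', 'At', 'Rn', 'Fr', 'Ra', 'Ac', 'Th', 'Pa', 'Np', 'Pu', 'Am', 'Cm', 'Bk', 'Cf',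
--               'Es', 'Fm', 'Md', 'No', 'Lr', 'Rf', 'Db', 'Sg', 'Bh', 'Hs', 'Mt', 'Ds', 'Rg', 'Cn', 'Fl', 'Lv']
--
-- def is_formula_like(tok):
--     if all(c.islower() and not c.isdigit() for c in tok[1:]):
--         return False
--
--     token_subs = tok
--     for el in elements_2:
--         token_subs = token_subs.replace(el, "")
--     for el in elements_1:
--         token_subs = token_subs.replace(el, "")
--     if len(token_subs) < len(tok):
--         return True
--
--     return False
-- ===== SOURCE B (Python) =====
-- _SINGLES = frozenset('HBCNOFPSKVYIWU')
--
-- _PAIRS = frozenset(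
--     'He Li Be Ne Na Mg Al Si Cl Ar Ca Sc Ti Cr Mn Fe Co Ni Cu Zn Ga Ge As Se '
--     'Br Kr Rb Sr Zr Nb Mo Tc Ru Rh Pd Ag Cd In Sn Sb Te Xe Cs Ba La Ce Pr Nd '
--     'Pm Sm Eu Gd Tb Dy Ho Er Tm Yb Lu Hf Ta Re Os Ir Pt Au Hg Tl Pb Bi Po At '
--     'Rn Fr Ra Ac Th Pa Np Pu Am Cm Bk Cf Es Fm Md No Lr Rf Db Sg Bh Hs Mt Ds '
--     'Rg Cn Fl Lv'.split())
--
--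
-- def is_formula_like(tok):
--     # same guard as the original
--     if all(c.islower() and not c.isdigit() for c in tok[1:]):
--         return False
--     # one pass with a one-character look-behind accumulator: at each character,
--     # does a one-letter symbol sit here, or a two-letter symbol end here?
--     prev = ''
--     for c in tok:
--         if c in _SINGLES or prev + c in _PAIRS:
--             return True
--         prev = c
--     return False
-- ===== Notes on version B (the rewrite author's own statement) =====
-- stated objective: alternative
-- what changed: Replaces the 114 whole-string replace passes followed by a length comparison with a single left-to-right pass carrying a one-character look-behind accumulator, testing at each character whether it is a one-letter symbol or finishes a two-letter symbol against precomputed frozensets (some symbol occurring as a substring is exactly equivalent to some replace pass removing something); the guard on tok[1:] is unchanged.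
import Mathlib
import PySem

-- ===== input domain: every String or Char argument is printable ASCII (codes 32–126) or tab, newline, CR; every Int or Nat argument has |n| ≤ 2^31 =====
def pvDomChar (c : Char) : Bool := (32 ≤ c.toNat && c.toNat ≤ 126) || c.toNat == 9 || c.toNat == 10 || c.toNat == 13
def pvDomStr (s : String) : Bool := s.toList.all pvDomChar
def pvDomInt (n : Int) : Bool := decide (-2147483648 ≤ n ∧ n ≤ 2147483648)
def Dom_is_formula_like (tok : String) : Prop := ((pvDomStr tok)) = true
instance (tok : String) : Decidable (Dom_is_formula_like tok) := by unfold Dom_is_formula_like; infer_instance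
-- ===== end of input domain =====

-- B replaces A's 114 whole-string replace passes (then a length comparison) by one
-- left-to-right pass with a one-character look-behind accumulator, testing each character
-- (and the pair ending at it) against precomputed sets of element symbols; the guard over
-- tok[1:] is unchanged.

-- ===== PORT A =====
def pvElements1 : List String := ["H", "B", "C", "N", "O", "F", "P", "S", "K", "V", "Y", "I", "W", "U"]

def pvElements2 : List String := ["He", "Li", "Be", "Ne", "Na", "Mg", "Al", "Si", "Cl", "Ar", "Ca", "Sc", "Ti", "Cr",
  "Mn", "Fe", "Co", "Ni", "Cu", "Zn", "Ga", "Ge", "As", "Se", "Br", "Kr", "Rb", "Sr",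
  "Zr", "Nb", "Mo", "Tc", "Ru", "Rh", "Pd", "Ag", "Cd", "In", "Sn", "Sb", "Te", "Xe",
  "Cs", "Ba", "La", "Ce", "Pr", "Nd", "Pm", "Sm", "Eu", "Gd", "Tb", "Dy", "Ho", "Er",
  "Tm", "Yb", "Lu", "Hf", "Ta", "Re", "Os", "Ir", "Pt", "Au", "Hg", "Tl", "Pb", "Bi",
  "Po", "At", "Rn", "Fr", "Ra", "Ac", "Th", "Pa", "Np", "Pu", "Am", "Cm", "Bk", "Cf",
  "Es", "Fm", "Md", "No", "Lr", "Rf", "Db", "Sg", "Bh", "Hs", "Mt", "Ds", "Rg", "Cn", "Fl", "Lv"]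

def is_formula_like (tok : String) : Bool :=
  -- if all(c.islower() and not c.isdigit() for c in tok[1:]): return False
  if (PySem.Chars.slice tok.toList (some 1) none).all
       (fun c => PySem.Chars.islower c && !PySem.Chars.isdigit c) then false
  else
    -- token_subs = tok; for el in elements_2: …replace…; for el in elements_1: …replace…
    let t2 := pvElements2.foldl (fun s el => PySem.Chars.replace s el.toList []) tok.toList
    let t1 := pvElements1.foldl (fun s el => PySem.Chars.replace s el.toList []) t2
    if t1.length < tok.toList.length then true else false

-- ===== PORT B =====
-- _SINGLES = frozenset('HBCNOFPSKVYIWU'); _PAIRS = frozenset('He Li … Lv'.split())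
def pvSingles : PySem.Set Char := PySem.Set.ofList "HBCNOFPSKVYIWU".toList

def pvPairsSrc : String := "He Li Be Ne Na Mg Al Si Cl Ar Ca Sc Ti Cr Mn Fe Co Ni Cu Zn Ga Ge As Se Br Kr Rb Sr Zr Nb Mo Tc Ru Rh Pd Ag Cd In Sn Sb Te Xe Cs Ba La Ce Pr Nd Pm Sm Eu Gd Tb Dy Ho Er Tm Yb Lu Hf Ta Re Os Ir Pt Au Hg Tl Pb Bi Po At Rn Fr Ra Ac Th Pa Np Pu Am Cm Bk Cf Es Fm Md No Lr Rf Db Sg Bh Hs Mt Ds Rg Cn Fl Lv"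

def pvPairs : PySem.Set (List Char) := PySem.Set.ofList (PySem.Chars.split₀ pvPairsSrc.toList)

-- 'prev = ""; for c in tok: if c in _SINGLES or prev + c in _PAIRS: return True; prev = c; return False'
def pvScanPass : List Char → List Char → Bool
  | _, [] => false
  | prev, c :: rest =>
      if PySem.Set.contains pvSingles c || PySem.Set.contains pvPairs (prev ++ [c]) then true
      else pvScanPass [c] rest

def is_formula_like_alt (tok : String) : Bool :=
  if (PySem.Chars.slice tok.toList (some 1) none).all
       (fun c => PySem.Chars.islower c && !PySem.Chars.isdigit c) then false
  else pvScanPass [] tok.toList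

-- ===== PRECONDITION & SPEC =====
def Spec_is_formula_like (tok : String) (out : Bool) : Prop := out = is_formula_like_alt tok
instance (tok : String) (out : Bool) : Decidable (Spec_is_formula_like tok out) := by unfold Spec_is_formula_like; infer_instance

-- ===== CLAIM (what is proved, stated in full; the proofs are below) =====
def Claim_equal_is_formula_like : Prop := ∀ (tok : String), Dom_is_formula_like tok → Spec_is_formula_like tok (is_formula_like tok)

-- ===== LEMMAS AND PROOFS =====

-- symbol shapes
set_option maxRecDepth 8192 in
theorem pv_len1 : ∀ el ∈ pvElements1, el.toList.length = 1 := by decide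

set_option maxRecDepth 8192 in
theorem pv_len2 : ∀ el ∈ pvElements2, el.toList.length = 2 := by decide

set_option maxRecDepth 8192 in
theorem pv_nonempty : ∀ el ∈ pvElements2 ++ pvElements1, el.toList ≠ [] := by decide

-- the split of B's pair string is exactly A's two-letter list
set_option maxRecDepth 16384 in
theorem pv_pairs_split : PySem.Chars.split₀ pvPairsSrc.toList = pvElements2.map String.toList := by decide

-- B's single letters are exactly A's one-letter list
set_option maxRecDepth 8192 in
theorem pv_singles_chars : pvElements1.map String.toList = "HBCNOFPSKVYIWU".toList.map (fun c => [c]) := by decide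

theorem pv_mem_pairs (p : List Char) :
    PySem.Set.contains pvPairs p = true ↔ p ∈ pvElements2.map String.toList := by
  rw [PySem.Set.contains_iff]
  unfold pvPairs
  rw [PySem.Set.mem_ofList, pv_pairs_split]

theorem pv_mem_singles (c : Char) :
    PySem.Set.contains pvSingles c = true ↔ [c] ∈ pvElements1.map String.toList := by
  rw [PySem.Set.contains_iff]
  unfold pvSingles
  rw [PySem.Set.mem_ofList, pv_singles_chars]
  constructor
  · intro h; exact List.mem_map.mpr ⟨c, h, rfl⟩
  · intro h
    rcases List.mem_map.mp h with ⟨d, hd, he⟩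
    cases he; exact hd

-- ===== A-side: the replace chain shrinks iff some symbol occurs =====

-- length bound for replace.go with empty replacement and nonempty pattern
theorem pv_go_len_le (old : List Char) (hne : old ≠ []) : ∀ (fuel : Nat) (l acc : List Char), l.length ≤ fuel →
    (PySem.Chars.replace.go old [] fuel l acc).length ≤ acc.length + l.length := by
  intro fuel
  induction fuel with
  | zero =>
    intro l acc hl
    have : l = [] := List.eq_nil_of_length_eq_zero (Nat.le_zero.mp hl)
    subst this
    rw [PySem.Chars.replace.go]
    simp
  | succ fuel ih =>
    intro l acc hl
    cases l with
    | nil =>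
      rw [PySem.Chars.replace.go]
      · simp
      · simp
    | cons c t =>
      rw [PySem.Chars.replace.go]
      simp only [List.reverse_nil, List.nil_append]
      split
      · have hlen : 0 < old.length := List.length_pos_of_ne_nil hne
        have hlt : t.length ≤ fuel := by simp at hl; omega
        have hble : (List.drop old.length (c :: t)).length ≤ t.length := by
          simp only [List.length_drop, List.length_cons]
          omega
        have hdrop := ih (List.drop old.length (c :: t)) acc (le_trans hble hlt)
        have hmono : acc.length + (List.drop old.length (c :: t)).length
            ≤ acc.length + (c :: t).length := by
          simp only [List.length_cons]
          omega
        omega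
      · have := ih t (c :: acc) (by simp at hl ⊢; omega)
        simp at this ⊢
        omega

-- replace.go is the identity transformation when the pattern does not occur
theorem pv_go_no_match (old : List Char) : ∀ (fuel : Nat) (l acc : List Char), l.length ≤ fuel →
    ¬ old <:+: l → PySem.Chars.replace.go old [] fuel l acc = acc.reverse ++ l := by
  intro fuel
  induction fuel with
  | zero =>
    intro l acc hl _
    have : l = [] := List.eq_nil_of_length_eq_zero (Nat.le_zero.mp hl)
    subst this
    rw [PySem.Chars.replace.go]
  | succ fuel ih =>
    intro l acc hl hm
    cases l with
    | nil =>
      rw [PySem.Chars.replace.go]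
      · simp
      · simp
    | cons c t =>
      rw [PySem.Chars.replace.go]
      simp only [List.reverse_nil, List.nil_append]
      split
      · exact absurd (List.isPrefixOf_iff_prefix.mp (by assumption)).isInfix hm
      · rw [ih t (c :: acc) (by simp at hl ⊢; omega)
          (fun hx => hm (List.infix_cons_iff.mpr (Or.inr hx)))]
        simp

-- replace.go strictly shrinks when the (nonempty) pattern occurs
theorem pv_go_match (old : List Char) (hne : old ≠ []) : ∀ (fuel : Nat) (l acc : List Char),
    l.length ≤ fuel → old <:+: l →
    (PySem.Chars.replace.go old [] fuel l acc).length < acc.length + l.length := by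
  intro fuel
  induction fuel with
  | zero =>
    intro l acc hl hm
    have : l = [] := List.eq_nil_of_length_eq_zero (Nat.le_zero.mp hl)
    subst this
    exact absurd (List.eq_nil_of_infix_nil hm) hne
  | succ fuel ih =>
    intro l acc hl hm
    cases l with
    | nil => exact absurd (List.eq_nil_of_infix_nil hm) hne
    | cons c t =>
      rw [PySem.Chars.replace.go]
      simp only [List.reverse_nil, List.nil_append]
      split
      · have hpre : old <+: c :: t := List.isPrefixOf_iff_prefix.mp (by assumption)
        have hlen : 0 < old.length := List.length_pos_of_ne_nil hne
        have hole : old.length ≤ (c :: t).length := hpre.length_le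
        have hlt : t.length ≤ fuel := by simp at hl; omega
        have hble : (List.drop old.length (c :: t)).length ≤ t.length := by
          simp only [List.length_drop, List.length_cons]
          omega
        have hdrop := pv_go_len_le old hne fuel (List.drop old.length (c :: t)) acc
          (le_trans hble hlt)
        have hdlt : (List.drop old.length (c :: t)).length < (c :: t).length := by
          simp only [List.length_drop, List.length_cons] at *
          omega
        omega
      · have hmt : old <:+: t := by
          rcases List.infix_cons_iff.mp hm with hp | hs
          · exact absurd (List.isPrefixOf_iff_prefix.mpr hp) (by assumption)
          · exact hs
        have := ih t (c :: acc) (by simp at hl ⊢; omega) hmt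
        simp at this ⊢
        omega

theorem pv_replace_no_match (s old : List Char) (hne : old ≠ []) (hm : ¬ old <:+: s) :
    PySem.Chars.replace s old [] = s := by
  unfold PySem.Chars.replace
  rw [if_neg (by simpa using hne)]
  simpa using pv_go_no_match old s.length s [] le_rfl hm

theorem pv_replace_match (s old : List Char) (hne : old ≠ []) (hm : old <:+: s) :
    (PySem.Chars.replace s old []).length < s.length := by
  unfold PySem.Chars.replace
  rw [if_neg (by simpa using hne)]
  simpa using pv_go_match old hne s.length s [] le_rfl hm

theorem pv_replace_len_le (s old : List Char) (hne : old ≠ []) :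
    (PySem.Chars.replace s old []).length ≤ s.length := by
  unfold PySem.Chars.replace
  rw [if_neg (by simpa using hne)]
  simpa using pv_go_len_le old hne s.length s [] le_rfl

-- the replace chain over a list of nonempty patterns
theorem pv_fold_no_match (L : List String) (s : List Char)
    (hne : ∀ el ∈ L, el.toList ≠ []) (hm : ∀ el ∈ L, ¬ el.toList <:+: s) :
    L.foldl (fun t el => PySem.Chars.replace t el.toList []) s = s := by
  induction L with
  | nil => rfl
  | cons hd tl ih =>
    simp only [List.foldl_cons]
    rw [pv_replace_no_match s hd.toList (hne hd (by simp)) (hm hd (by simp))]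
    exact ih (fun el hel => hne el (by simp [hel])) (fun el hel => hm el (by simp [hel]))

theorem pv_fold_len_le (L : List String) (s : List Char) (hne : ∀ el ∈ L, el.toList ≠ []) :
    (L.foldl (fun t el => PySem.Chars.replace t el.toList []) s).length ≤ s.length := by
  induction L generalizing s with
  | nil => exact le_rfl
  | cons hd tl ih =>
    simp only [List.foldl_cons]
    exact le_trans (ih (PySem.Chars.replace s hd.toList []) (fun el hel => hne el (by simp [hel])))
      (pv_replace_len_le s hd.toList (hne hd (by simp)))

theorem pv_fold_match (L : List String) (s : List Char) (hne : ∀ el ∈ L, el.toList ≠ [])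
    (hm : ∃ el ∈ L, el.toList <:+: s) :
    (L.foldl (fun t el => PySem.Chars.replace t el.toList []) s).length < s.length := by
  induction L generalizing s with
  | nil => rcases hm with ⟨el, hel, _⟩; simp at hel
  | cons hd tl ih =>
    simp only [List.foldl_cons]
    by_cases hhd : hd.toList <:+: s
    · exact lt_of_le_of_lt
        (pv_fold_len_le tl (PySem.Chars.replace s hd.toList []) (fun el hel => hne el (by simp [hel])))
        (pv_replace_match s hd.toList (hne hd (by simp)) hhd)
    · rw [pv_replace_no_match s hd.toList (hne hd (by simp)) hhd]
      rcases hm with ⟨el, hel, hinf⟩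
      rcases List.mem_cons.mp hel with rfl | hel'
      · exact absurd hinf hhd
      · exact ih s (fun e he => hne e (by simp [he])) ⟨el, hel', hinf⟩

-- A's length test ⟺ some symbol occurs as a substring
theorem pv_A_iff (cs : List Char) :
    ((pvElements1.foldl (fun s el => PySem.Chars.replace s el.toList [])
       (pvElements2.foldl (fun s el => PySem.Chars.replace s el.toList []) cs)).length < cs.length)
    ↔ ∃ el ∈ pvElements2 ++ pvElements1, el.toList <:+: cs := by
  rw [← List.foldl_append]
  constructor
  · intro hlt
    by_contra hno
    rw [pv_fold_no_match _ _ pv_nonempty (fun el hel hinf => hno ⟨el, hel, hinf⟩)] at hlt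
    exact lt_irrefl _ hlt
  · intro hex
    exact pv_fold_match _ _ pv_nonempty hex

-- ===== B-side: the look-behind scan finds exactly the occurring symbols =====

-- scan invariant: with a look-behind of at most one character, the pass succeeds iff a
-- one-letter symbol lies in the remaining text or a two-letter symbol is an infix of
-- look-behind ++ remaining text
theorem pv_scan_iff (cs prev : List Char) (hprev : prev.length ≤ 1) :
    pvScanPass prev cs = true ↔
      (∃ c ∈ cs, PySem.Set.contains pvSingles c = true) ∨
      (∃ p ∈ pvElements2.map String.toList, p <:+: prev ++ cs) := by
  induction cs generalizing prev with
  | nil =>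
    simp only [pvScanPass]
    constructor
    · intro h; cases h
    · rintro (⟨c, hc, _⟩ | ⟨p, hp, hinf⟩)
      · simp at hc
      · rcases List.mem_map.mp hp with ⟨el, hel, rfl⟩
        have h2 := pv_len2 el hel
        have hle := hinf.length_le
        rw [List.append_nil] at hle
        omega
  | cons c rest ih =>
    simp only [pvScanPass]
    split
    · rename_i hcond
      simp only [true_iff]
      rcases Bool.or_eq_true_iff.mp hcond with hs | hp
      · exact Or.inl ⟨c, List.mem_cons_self, hs⟩
      · refine Or.inr ⟨prev ++ [c], (pv_mem_pairs _).mp hp, ?_⟩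
        exact List.IsPrefix.isInfix (⟨rest, by simp⟩ : prev ++ [c] <+: prev ++ c :: rest)
    · rename_i hcond
      rw [ih [c] (by simp)]
      have hsing : PySem.Set.contains pvSingles c = false := by
        cases h : PySem.Set.contains pvSingles c
        · rfl
        · exact absurd (Bool.or_eq_true_iff.mpr (Or.inl h)) hcond
      have hpair : PySem.Set.contains pvPairs (prev ++ [c]) = false := by
        cases h : PySem.Set.contains pvPairs (prev ++ [c])
        · rfl
        · exact absurd (Bool.or_eq_true_iff.mpr (Or.inr h)) hcond
      constructor
      · rintro (⟨d, hd, hds⟩ | ⟨p, hp, hinf⟩)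
        · exact Or.inl ⟨d, List.mem_cons_of_mem _ hd, hds⟩
        · exact Or.inr ⟨p, hp, hinf.trans (by exact ⟨prev, [], by simp⟩)⟩
      · rintro (⟨d, hd, hds⟩ | ⟨p, hp, hinf⟩)
        · rcases List.mem_cons.mp hd with rfl | hd'
          · rw [hds] at hsing; cases hsing
          · exact Or.inl ⟨d, hd', hds⟩
        · -- p has length 2; it is an infix of prev ++ c :: rest
          rcases List.mem_map.mp hp with ⟨el, hel, rfl⟩
          have h2 := pv_len2 el hel
          right
          refine ⟨el.toList, hp, ?_⟩
          -- decompose the occurrence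
          cases prev with
          | nil =>
            simpa using hinf
          | cons a tl =>
            have htl : tl = [] := by
              cases tl
              · rfl
              · simp at hprev
            subst htl
            rcases List.infix_cons_iff.mp hinf with hpre | hsuf
            · -- el.toList <+: a :: c :: rest, length 2 ⇒ el.toList = [a, c]
              exfalso
              rcases List.length_eq_two.mp h2 with ⟨x, y, hxy⟩
              rw [hxy] at hpre
              rcases List.cons_prefix_cons.mp hpre with ⟨rfl, h'⟩
              have h'' : [y] <+: c :: rest := by simpa using h'
              rcases List.cons_prefix_cons.mp h'' with ⟨rfl, _⟩
              have hc2 : PySem.Set.contains pvPairs ([x] ++ [y]) = true := by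
                apply (pv_mem_pairs _).mpr
                have he : ([x] ++ [y] : List Char) = el.toList := by rw [hxy]; rfl
                rw [he]; exact hp
              rw [hpair] at hc2
              cases hc2
            · exact hsuf

-- combine: B's scan ⟺ some symbol occurs as a substring
theorem pv_B_iff (cs : List Char) :
    pvScanPass [] cs = true ↔ ∃ el ∈ pvElements2 ++ pvElements1, el.toList <:+: cs := by
  rw [pv_scan_iff cs [] (by simp)]
  simp only [List.nil_append]
  constructor
  · rintro (⟨c, hc, hs⟩ | ⟨p, hp, hinf⟩)
    · rcases List.mem_map.mp ((pv_mem_singles c).mp hs) with ⟨el, hel, heq⟩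
      refine ⟨el, List.mem_append.mpr (Or.inr hel), ?_⟩
      rw [heq]
      rcases List.append_of_mem hc with ⟨s, t, rfl⟩
      exact ⟨s, t, by simp⟩
    · rcases List.mem_map.mp hp with ⟨el, hel, heq⟩
      exact ⟨el, List.mem_append.mpr (Or.inl hel), heq ▸ hinf⟩
  · rintro ⟨el, hel, hinf⟩
    rcases List.mem_append.mp hel with h2 | h1
    · exact Or.inr ⟨el.toList, List.mem_map.mpr ⟨el, h2, rfl⟩, hinf⟩
    · have h1len := pv_len1 el h1
      obtain ⟨x, hx⟩ : ∃ x, el.toList = [x] := by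
        rcases hl : el.toList with _ | ⟨x, _ | _⟩
        · rw [hl] at h1len; simp at h1len
        · exact ⟨x, rfl⟩
        · rw [hl] at h1len; simp at h1len
      refine Or.inl ⟨x, ?_, (pv_mem_singles x).mpr (List.mem_map.mpr ⟨el, h1, hx⟩)⟩
      exact (hx ▸ hinf).subset List.mem_cons_self

-- ===== VERDICT (by name: the statement is the Claim_ definition above) =====
theorem is_formula_like_spec : Claim_equal_is_formula_like := by
  intro tok _
  unfold Spec_is_formula_like is_formula_like is_formula_like_alt
  split
  · rfl
  · have h := (pv_A_iff tok.toList).trans (pv_B_iff tok.toList).symm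
    dsimp only
    split
    · exact (h.mp (by assumption)).symm
    · exact ((Bool.eq_false_iff).mpr (fun hx => (by assumption : ¬ _) (h.mpr hx))).symm
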